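-- pv_equiv track=rewrite | github.com/shunn2/forcodingtest | 백준/silver/practice.py | solution
-- ===== SOURCE A (Python) =====
-- def solution(v):
--     x_list=[]
--     y_list=[]
--     for i in range(len(v)):
--         x_list.append(v[i][0])
--         y_list.append(v[i][1])
--     x_list.sort()
--     y_list.sort()
--     return [x_list[1],y_list[1]]
-- ===== SOURCE B (Python) =====
-- def _init2(a, b):
--     return (a, b) if a <= b else (b, a)
--
-- def _step(m, c):
--     m1, m2 = m
--     if c <= m1:
--         return (c, m1)
--     elif c < m2:
--         return (m1, c)
--     return m
--
-- def solution(v):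
--     mx = _init2(v[0][0], v[1][0])
--     my = _init2(v[0][1], v[1][1])
--     for p in v[2:]:
--         mx = _step(mx, p[0])
--         my = _step(my, p[1])
--     return [mx[1], my[1]]
-- ===== Notes on version B (the rewrite author's own statement) =====
-- stated objective: alternative
-- what changed: Replaces building two full coordinate lists, sorting both and indexing [1] with a single pass that maintains the two smallest x and y values (running second-minimum order statistics).
import Mathlib
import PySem

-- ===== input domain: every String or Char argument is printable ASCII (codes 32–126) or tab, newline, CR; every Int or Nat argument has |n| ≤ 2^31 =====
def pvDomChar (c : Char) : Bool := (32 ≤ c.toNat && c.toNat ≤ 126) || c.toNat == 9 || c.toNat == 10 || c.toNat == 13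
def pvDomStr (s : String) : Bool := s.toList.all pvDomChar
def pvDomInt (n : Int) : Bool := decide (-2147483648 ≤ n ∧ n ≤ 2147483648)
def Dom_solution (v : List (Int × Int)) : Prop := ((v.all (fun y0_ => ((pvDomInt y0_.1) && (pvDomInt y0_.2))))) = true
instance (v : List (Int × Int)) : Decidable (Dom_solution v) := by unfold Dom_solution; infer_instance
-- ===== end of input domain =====

-- B replaces sort-then-index by a one-pass second-minimum scan.

-- ===== PORT A =====
def solution (v : List (Int × Int)) : List Int :=
  -- x_list=[]; y_list=[]; for i in range(len(v)): append v[i][0] / v[i][1]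
  let lists := (PySem.List.pyRange 0 (v.length : Int) 1).foldl
    (fun (acc : List Int × List Int) i =>
      ((acc.1 ++ [(PySem.List.pyGetD v i (0, 0)).1], acc.2 ++ [(PySem.List.pyGetD v i (0, 0)).2]) : List Int × List Int)) ([], [])
  let xs := PySem.List.sorted lists.1 (fun x => x) false
  let ys := PySem.List.sorted lists.2 (fun x => x) false
  [PySem.List.pyGetD xs 1 0, PySem.List.pyGetD ys 1 0]

-- ===== PORT B =====
def pvInit2 (a b : Int) : Int × Int := if a ≤ b then (a, b) else (b, a)

def pvStep (m : Int × Int) (c : Int) : Int × Int :=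
  if c ≤ m.1 then (c, m.1) else if c < m.2 then (m.1, c) else m

def solution_alt (v : List (Int × Int)) : List Int :=
  match v with
  | p0 :: p1 :: rest =>
    let r := rest.foldl (fun (m : (Int × Int) × (Int × Int)) p =>
      (pvStep m.1 p.1, pvStep m.2 p.2)) (pvInit2 p0.1 p1.1, pvInit2 p0.2 p1.2)
    [r.1.2, r.2.2]
  | _ => []   -- Python B raises IndexError here, like A; outside Pre_

-- ===== PRECONDITION & SPEC =====
-- A (and B) raise IndexError when fewer than two points are given; those inputs are excluded.
def Pre_solution (v : List (Int × Int)) : Prop := 2 ≤ v.length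
instance (v : List (Int × Int)) : Decidable (Pre_solution v) := by unfold Pre_solution; infer_instance
def pvWitness_solution : (List (Int × Int)) := [(1, 2), (0, 3), (4, 1)]
def Spec_solution (v : List (Int × Int)) (out : List Int) : Prop := out = solution_alt v
instance (v : List (Int × Int)) (out : List Int) : Decidable (Spec_solution v out) := by unfold Spec_solution; infer_instance

-- ===== CLAIM (what is proved, stated in full; the proofs are below) =====
def Claim_equal_solution : Prop := ∀ (v : List (Int × Int)), Dom_solution v → Pre_solution v → Spec_solution v (solution v)

-- ===== LEMMAS AND PROOFS =====

-- A's collection loop produces the two coordinate projections.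
theorem pvLists_eq (v : List (Int × Int)) :
    (PySem.List.pyRange 0 (v.length : Int) 1).foldl
      (fun (acc : List Int × List Int) i =>
        ((acc.1 ++ [(PySem.List.pyGetD v i (0, 0)).1], acc.2 ++ [(PySem.List.pyGetD v i (0, 0)).2]) : List Int × List Int)) ([], [])
      = (v.map Prod.fst, v.map Prod.snd) := by
  rw [PySem.List.foldl_pyRange_zero_pyGetD' v (0, 0)
      (fun (acc : List Int × List Int) p => (acc.1 ++ [p.1], acc.2 ++ [p.2])) ([], [])]
  suffices h : ∀ (w : List (Int × Int)) (a b : List Int),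
      w.foldl (fun (acc : List Int × List Int) p => (acc.1 ++ [p.1], acc.2 ++ [p.2])) (a, b)
        = (a ++ w.map Prod.fst, b ++ w.map Prod.snd) by
    simpa using h v [] []
  intro w
  induction w with
  | nil => intro a b; simp
  | cons p t ih => intro a b; simp [List.foldl_cons, ih]

-- one step: if sorted l starts with m1::m2, sorted (l ++ [c]) starts with pvStep (m1,m2) c
theorem pvStep_sorted (l : List Int) (m1 m2 c : Int) (s : List Int)
    (h : PySem.List.sorted l (fun x => x) false = m1 :: m2 :: s) :
    ∃ s', PySem.List.sorted (l ++ [c]) (fun x => x) false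
      = (pvStep (m1, m2) c).1 :: (pvStep (m1, m2) c).2 :: s' := by
  have hperm : (m1 :: m2 :: s).Perm l := h ▸ PySem.List.sorted_perm l (fun x => x) false
  have hpw : (m1 :: m2 :: s).Pairwise (fun a b : Int => a ≤ b) := by
    have := PySem.List.sorted_pairwise l (fun x => x)
    rw [h] at this; exact this
  have h12 : m1 ≤ m2 := (List.pairwise_cons.mp hpw).1 m2 (by simp)
  have h2s : ∀ x ∈ s, m2 ≤ x := (List.pairwise_cons.mp (List.pairwise_cons.mp hpw).2).1
  have h1s : ∀ x ∈ s, m1 ≤ x := fun x hx => le_trans h12 (h2s x hx)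
  have hc1perm : (c :: m1 :: m2 :: s).Perm (l ++ [c]) :=
    (hperm.cons c).trans (List.perm_append_comm (l₁ := [c]) (l₂ := l))
  unfold pvStep
  by_cases hc1 : c ≤ m1
  · refine ⟨m2 :: s, ?_⟩
    simp only [hc1, if_pos]
    refine PySem.List.sorted_id_eq_of_perm_of_pairwise _ _ hc1perm ?_
    refine List.pairwise_cons.mpr ⟨?_, hpw⟩
    intro x hx
    simp only [List.mem_cons] at hx
    rcases hx with rfl | rfl | hx
    · exact hc1
    · exact le_trans hc1 h12
    · exact le_trans hc1 (h1s x hx)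
  · by_cases hc2 : c < m2
    · refine ⟨m2 :: s, ?_⟩
      simp only [hc1, if_neg, not_false_iff, hc2, if_pos]
      refine PySem.List.sorted_id_eq_of_perm_of_pairwise _ _
        ((List.Perm.swap c m1 (m2 :: s)).trans hc1perm) ?_
      refine List.pairwise_cons.mpr ⟨?_, List.pairwise_cons.mpr
        ⟨?_, (List.pairwise_cons.mp hpw).2⟩⟩
      · intro x hx
        simp only [List.mem_cons] at hx
        rcases hx with rfl | rfl | hx
        · exact le_of_not_ge hc1
        · exact h12
        · exact h1s x hx
      · intro x hx
        simp only [List.mem_cons] at hx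
        rcases hx with rfl | hx
        · exact le_of_lt hc2
        · exact le_trans (le_of_lt hc2) (h2s x hx)
    · refine ⟨PySem.List.sorted (s ++ [c]) (fun x => x) false, ?_⟩
      simp only [hc1, hc2, if_neg, not_false_iff]
      have hs : (PySem.List.sorted (s ++ [c]) (fun x => x) false).Perm (s ++ [c]) :=
        PySem.List.sorted_perm _ _ _
      refine PySem.List.sorted_id_eq_of_perm_of_pairwise _ _
        (((hs.cons m2).cons m1).trans (hperm.append_right [c])) ?_
      have hm2all : ∀ x ∈ PySem.List.sorted (s ++ [c]) (fun x => x) false, m2 ≤ x := by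
        intro x hx
        rcases List.mem_append.mp ((PySem.List.mem_sorted _ _ _ _).mp hx) with hx' | hx'
        · exact h2s x hx'
        · simp only [List.mem_singleton] at hx'; subst hx'; exact le_of_not_gt hc2
      refine List.pairwise_cons.mpr ⟨?_, List.pairwise_cons.mpr
        ⟨hm2all, PySem.List.sorted_pairwise _ _⟩⟩
      intro x hx
      simp only [List.mem_cons] at hx
      rcases hx with rfl | hx
      · exact h12
      · exact le_trans h12 (hm2all x hx)

-- the fold invariant over the remaining elements
theorem pvFold_sorted (rest : List Int) : ∀ (l : List Int) (m1 m2 : Int) (s : List Int),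
    PySem.List.sorted l (fun x => x) false = m1 :: m2 :: s →
    ∃ s', PySem.List.sorted (l ++ rest) (fun x => x) false
      = (rest.foldl pvStep (m1, m2)).1 :: (rest.foldl pvStep (m1, m2)).2 :: s' := by
  induction rest with
  | nil => intro l m1 m2 s h; exact ⟨s, by simpa using h⟩
  | cons c t ih =>
    intro l m1 m2 s h
    obtain ⟨s1, h1⟩ := pvStep_sorted l m1 m2 c s h
    have := ih (l ++ [c]) (pvStep (m1, m2) c).1 (pvStep (m1, m2) c).2 s1 h1
    simpa [List.append_assoc] using this

theorem pvInit2_sorted (a b : Int) :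
    PySem.List.sorted [a, b] (fun x => x) false = (pvInit2 a b).1 :: (pvInit2 a b).2 :: [] := by
  unfold pvInit2
  by_cases hab : a ≤ b
  · simp only [hab, if_pos]
    exact PySem.List.sorted_id_eq_of_perm_of_pairwise [a, b] [a, b]
      (List.Perm.refl _) (by simp [hab])
  · simp only [hab, if_neg, not_false_iff]
    exact PySem.List.sorted_id_eq_of_perm_of_pairwise [a, b] [b, a]
      (List.Perm.swap a b []) (by simp [le_of_not_ge hab])

-- for any coordinate list a :: b :: t, the scan's second component is sorted[1]
theorem pvSecondMin (a b : Int) (t : List Int) :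
    PySem.List.pyGetD (PySem.List.sorted (a :: b :: t) (fun x => x) false) 1 0
      = (t.foldl pvStep (pvInit2 a b)).2 := by
  obtain ⟨s', hs⟩ := pvFold_sorted t [a, b] (pvInit2 a b).1 (pvInit2 a b).2 [] (pvInit2_sorted a b)
  have hl : (a :: b :: t) = [a, b] ++ t := by simp
  rw [hl, hs]
  simp [PySem.List.pyGetD]

-- ===== VERDICT (by name: the statement is the Claim_ definition above) =====
theorem solution_spec : Claim_equal_solution := by
  intro v _ hpre
  unfold Spec_solution solution solution_alt
  match v, hpre with
  | p0 :: p1 :: rest, _ =>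
    simp only [pvLists_eq]
    rw [PySem.List.foldl_prod_mk (fun m (p : Int × Int) => pvStep m p.1)
        (fun m (p : Int × Int) => pvStep m p.2) rest (pvInit2 p0.1 p1.1) (pvInit2 p0.2 p1.2)]
    have hx := pvSecondMin p0.1 p1.1 (rest.map Prod.fst)
    have hy := pvSecondMin p0.2 p1.2 (rest.map Prod.snd)
    simp only [List.foldl_map] at hx hy
    simp only [List.map_cons]
    rw [hx, hy]
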